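-- pv_equiv track=rewrite | github.com/milkshakeiii/simple_python_projects | other/fish.py | try_out_lure_set
-- ===== SOURCE A (Python) =====
-- def try_out_lure_set(lure_set, try_increment):
--     total_pointwise_distance_for_all_fish = 0
--     for r in range(1, 11, try_increment):
--         for g in range(1, 11, try_increment):
--             for b in range(1, 11, try_increment):
--                 for a in range(1, 11, try_increment):
--                     best_lure_pointwise_distance = 400
--                     for lure in lure_set:
--                         best_lure_pointwise_distance = min(best_lure_pointwise_distance, compute_pointwise_distance(lure, r, g, b, a))
--                     total_pointwise_distance_for_all_fish += best_lure_pointwise_distance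
--     return total_pointwise_distance_for_all_fish
--
-- def compute_pointwise_distance(lure, r, g, b, a):
--     distance = 0
--     distance += abs(lure[0]-r)
--     distance += abs(lure[1]-g)
--     distance += abs(lure[2]-b)
--     distance += abs(lure[3]-a)
--     return distance
-- ===== SOURCE B (Python) =====
-- def try_out_lure_set(lure_set, try_increment):
--     vals = list(range(1, 11, try_increment))
--     if not vals:
--         return 0
--     # Every sampled color channel lies in [1, 10]; clamping a lure coordinate into
--     # that interval costs a fixed offset, so lures collapse into at most a few
--     # distinct (clamped point, offset) candidates: keep the best offset per clamp.
--     best_base = {}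
--     for lure in lure_set:
--         c = (min(10, max(1, lure[0])), min(10, max(1, lure[1])),
--              min(10, max(1, lure[2])), min(10, max(1, lure[3])))
--         base = (abs(lure[0] - c[0]) + abs(lure[1] - c[1])
--                 + abs(lure[2] - c[2]) + abs(lure[3] - c[3]))
--         if c not in best_base or base < best_base[c]:
--             best_base[c] = base
--     items = list(best_base.items())
--     total = 0
--     for r in vals:
--         for g in vals:
--             for b in vals:
--                 for a in vals:
--                     best = 400
--                     for (c, base) in items:
--                         dd = (base + abs(c[0] - r) + abs(c[1] - g)
--                               + abs(c[2] - b) + abs(c[3] - a))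
--                         if dd < best:
--                             best = dd
--                     total += best
--     return total
-- ===== Notes on version B (the rewrite author's own statement) =====
-- stated objective: alternative
-- what changed: Instead of scanning every lure for every grid point, B first clamps each lure into the sampled box [1,10]^4 (an L1 offset makes the clamp exact there) and keeps only the best offset per distinct clamped point in a dict, so the per-grid-point scan runs over the deduplicated clamped candidates instead of the raw lure list; it also early-exits with 0 when the sample range is empty.
import Mathlib
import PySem

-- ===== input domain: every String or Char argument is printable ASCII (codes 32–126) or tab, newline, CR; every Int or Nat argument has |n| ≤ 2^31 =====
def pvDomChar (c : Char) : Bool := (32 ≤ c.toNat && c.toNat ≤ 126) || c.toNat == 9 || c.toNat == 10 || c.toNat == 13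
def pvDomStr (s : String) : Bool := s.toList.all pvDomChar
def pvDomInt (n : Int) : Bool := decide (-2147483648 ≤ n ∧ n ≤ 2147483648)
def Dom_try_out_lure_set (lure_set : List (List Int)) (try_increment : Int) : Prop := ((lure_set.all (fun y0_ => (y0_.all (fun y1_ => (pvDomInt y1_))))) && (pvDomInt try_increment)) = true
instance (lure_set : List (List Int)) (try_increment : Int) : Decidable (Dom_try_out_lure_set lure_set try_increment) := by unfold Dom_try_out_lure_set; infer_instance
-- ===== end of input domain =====

-- B deduplicates lures by their clamp into the sampled box [1,10]^4 (keeping the best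
-- L1 offset per clamped point in a dict), so the inner scan per grid point runs over
-- the distinct clamped candidates instead of the raw lure list (objective: alternative).

-- ===== PORT A =====
def compute_pointwise_distance (lure : List Int) (r g b a : Int) : Int :=
  let distance : Int := 0
  let distance := distance + |PySem.List.pyGetD lure 0 0 - r|
  let distance := distance + |PySem.List.pyGetD lure 1 0 - g|
  let distance := distance + |PySem.List.pyGetD lure 2 0 - b|
  let distance := distance + |PySem.List.pyGetD lure 3 0 - a|
  distance

def try_out_lure_set (lure_set : List (List Int)) (try_increment : Int) : Int :=
  (PySem.List.pyRange 1 11 try_increment).foldl (fun tot r =>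
    (PySem.List.pyRange 1 11 try_increment).foldl (fun tot g =>
      (PySem.List.pyRange 1 11 try_increment).foldl (fun tot b =>
        (PySem.List.pyRange 1 11 try_increment).foldl (fun tot a =>
          tot + lure_set.foldl (fun best lure =>
            min best (compute_pointwise_distance lure r g b a)) 400) tot) tot) tot) 0

-- ===== PORT B =====
def pvClamp (x : Int) : Int := min 10 (max 1 x)

def pvKey (lure : List Int) : Int × Int × Int × Int :=
  (pvClamp (PySem.List.pyGetD lure 0 0), pvClamp (PySem.List.pyGetD lure 1 0),
   pvClamp (PySem.List.pyGetD lure 2 0), pvClamp (PySem.List.pyGetD lure 3 0))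

def pvBase (lure : List Int) : Int :=
  |PySem.List.pyGetD lure 0 0 - pvClamp (PySem.List.pyGetD lure 0 0)| +
  |PySem.List.pyGetD lure 1 0 - pvClamp (PySem.List.pyGetD lure 1 0)| +
  |PySem.List.pyGetD lure 2 0 - pvClamp (PySem.List.pyGetD lure 2 0)| +
  |PySem.List.pyGetD lure 3 0 - pvClamp (PySem.List.pyGetD lure 3 0)|

def pvUpd (d : PySem.Dict (Int × Int × Int × Int) Int) (lure : List Int) :
    PySem.Dict (Int × Int × Int × Int) Int :=
  if !d.contains (pvKey lure) || pvBase lure < d.getD (pvKey lure) 0 then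
    d.insert (pvKey lure) (pvBase lure)
  else d

def try_out_lure_set_alt (lure_set : List (List Int)) (try_increment : Int) : Int :=
  let vals := PySem.List.pyRange 1 11 try_increment
  if vals = [] then 0
  else
    let best_base := lure_set.foldl pvUpd PySem.Dict.empty
    let items := best_base.items
    vals.foldl (fun tot r =>
      vals.foldl (fun tot g =>
        vals.foldl (fun tot b =>
          vals.foldl (fun tot a =>
            tot + items.foldl (fun best cb =>
              let dd := cb.2 + |cb.1.1 - r| + |cb.1.2.1 - g| + |cb.1.2.2.1 - b| + |cb.1.2.2.2 - a|
              if dd < best then dd else best) 400) tot) tot) tot) 0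

-- ===== PRECONDITION & SPEC =====
-- Pre_ excludes exactly the inputs where the Python A raises: step 0 (range raises
-- ValueError), and a lure of fewer than 4 entries while the grid is non-empty
-- (lure[3] raises IndexError; with a positive step the grid is never empty).
def Pre_try_out_lure_set (lure_set : List (List Int)) (try_increment : Int) : Prop :=
  try_increment ≠ 0 ∧ (0 < try_increment → ∀ l ∈ lure_set, 4 ≤ l.length)
instance (lure_set : List (List Int)) (try_increment : Int) : Decidable (Pre_try_out_lure_set lure_set try_increment) := by unfold Pre_try_out_lure_set; infer_instance
def pvWitness_try_out_lure_set : List (List Int) × Int := ([[0, 3, 25, -7]], 1)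

def Spec_try_out_lure_set (lure_set : List (List Int)) (try_increment : Int) (out : Int) : Prop := out = try_out_lure_set_alt lure_set try_increment
instance (lure_set : List (List Int)) (try_increment : Int) (out : Int) : Decidable (Spec_try_out_lure_set lure_set try_increment out) := by unfold Spec_try_out_lure_set; infer_instance

-- ===== CLAIM (what is proved, stated in full; the proofs are below) =====
def Claim_equal_try_out_lure_set : Prop := ∀ (lure_set : List (List Int)) (try_increment : Int), Dom_try_out_lure_set lure_set try_increment → Pre_try_out_lure_set lure_set try_increment → Spec_try_out_lure_set lure_set try_increment (try_out_lure_set lure_set try_increment)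

-- ===== LEMMAS AND PROOFS =====

-- the value B's inner loop assigns to a dict item, for a fixed grid point
def pvG (r g b a : Int) (c : Int × Int × Int × Int) : Int :=
  |c.1 - r| + |c.2.1 - g| + |c.2.2.1 - b| + |c.2.2.2 - a|

-- fold of min over item values
def pvFB (r g b a : Int) (m0 : Int) (its : List ((Int × Int × Int × Int) × Int)) : Int :=
  its.foldl (fun m kw => min m (kw.2 + pvG r g b a kw.1)) m0

theorem pvFB_cons (r g b a m0 : Int) (kw : (Int × Int × Int × Int) × Int)
    (its : List ((Int × Int × Int × Int) × Int)) :
    pvFB r g b a m0 (kw :: its) = pvFB r g b a (min m0 (kw.2 + pvG r g b a kw.1)) its := rfl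

theorem pvFB_shift (r g b a : Int) (its : List ((Int × Int × Int × Int) × Int)) :
    ∀ (m0 x : Int), pvFB r g b a (min m0 x) its = min (pvFB r g b a m0 its) x := by
  induction its with
  | nil => intro m0 x; simp [pvFB]
  | cons kw tl ih =>
      intro m0 x
      rw [pvFB_cons, pvFB_cons, min_right_comm]
      exact ih _ x

theorem pvFB_le_start (r g b a : Int) (its : List ((Int × Int × Int × Int) × Int)) :
    ∀ m0, pvFB r g b a m0 its ≤ m0 := by
  induction its with
  | nil => intro m0; simp [pvFB]
  | cons kw tl ih =>
      intro m0
      rw [pvFB_cons]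
      exact le_trans (ih _) (min_le_left _ _)

theorem pvFB_le_mem (r g b a : Int) (its : List ((Int × Int × Int × Int) × Int))
    (c : Int × Int × Int × Int) (v : Int) (h : (c, v) ∈ its) :
    ∀ m0, pvFB r g b a m0 its ≤ v + pvG r g b a c := by
  induction its with
  | nil => cases h
  | cons kw tl ih =>
      intro m0
      rcases List.mem_cons.mp h with h1 | h1
      · subst h1
        rw [pvFB_cons]
        exact le_trans (pvFB_le_start _ _ _ _ _ _) (min_le_right _ _)
      · rw [pvFB_cons]
        exact ih h1 _

theorem pvFB_append (r g b a : Int) (its : List ((Int × Int × Int × Int) × Int))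
    (c : Int × Int × Int × Int) (v m0 : Int) :
    pvFB r g b a m0 (its ++ [(c, v)]) = min (pvFB r g b a m0 its) (v + pvG r g b a c) := by
  simp [pvFB, List.foldl_append]

theorem pvMapReplace_id (its : List ((Int × Int × Int × Int) × Int))
    (c : Int × Int × Int × Int) (v : Int) (h : c ∉ its.map (·.1)) :
    its.map (fun p => if p.1 == c then (c, v) else p) = its := by
  induction its with
  | nil => rfl
  | cons kw tl ih =>
      have h1 : kw.1 ≠ c := by
        intro hh; exact h (by simp [List.map_cons, hh])
      have h2 : c ∉ tl.map (·.1) := by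
        intro hh; exact h (by simp [List.map_cons, hh])
      simp only [List.map_cons]
      rw [if_neg (by simp [h1]), ih h2]

theorem pvFB_replace (r g b a : Int) (its : List ((Int × Int × Int × Int) × Int))
    (c : Int × Int × Int × Int) (v w : Int) (hnd : (its.map (·.1)).Nodup)
    (hmem : (c, v) ∈ its) (hw : w ≤ v) :
    ∀ m0, pvFB r g b a m0 (its.map (fun p => if p.1 == c then (c, w) else p)) =
      min (pvFB r g b a m0 its) (w + pvG r g b a c) := by
  induction its with
  | nil => cases hmem
  | cons kw tl ih =>
      intro m0
      rw [List.map_cons, List.nodup_cons] at hnd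
      by_cases hk : kw.1 = c
      · -- head holds the key; by nodup the tail does not
        have hcv : kw = (c, v) := by
          rcases List.mem_cons.mp hmem with h1 | h1
          · exact h1.symm
          · exact absurd (hk ▸ List.mem_map.mpr ⟨(c, v), h1, rfl⟩) hnd.1
        subst hcv
        have htl : c ∉ tl.map (·.1) := by simpa using hnd.1
        simp only [List.map_cons]
        rw [show (if ((c, v).1 == c) = true then (c, w) else (c, v)) = (c, w) from by simp,
          pvMapReplace_id tl c w htl, pvFB_cons, pvFB_cons, pvFB_shift, pvFB_shift,
          min_assoc, min_eq_right (by exact add_le_add hw le_rfl :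
            w + pvG r g b a c ≤ v + pvG r g b a c)]
      · have hmem' : (c, v) ∈ tl := by
          rcases List.mem_cons.mp hmem with h1 | h1
          · exact absurd (by rw [← h1]) hk
          · exact h1
        simp only [List.map_cons]
        rw [show (if (kw.1 == c) = true then (c, w) else kw) = kw from by simp [hk],
          pvFB_cons, pvFB_cons]
        exact ih hnd.2 hmem' _

-- clamping into [1,10] is exact for targets inside [1,10]
theorem pvClamp_abs (x t : Int) (h1 : 1 ≤ t) (h2 : t ≤ 10) :
    |x - t| = |x - pvClamp x| + |pvClamp x - t| := by
  unfold pvClamp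
  rcases abs_cases (x - t) with ⟨e1, _⟩ | ⟨e1, _⟩ <;>
    rcases abs_cases (x - min 10 (max 1 x)) with ⟨e2, _⟩ | ⟨e2, _⟩ <;>
      rcases abs_cases (min 10 (max 1 x) - t) with ⟨e3, _⟩ | ⟨e3, _⟩ <;>
        omega

theorem pv_dist_eq (lure : List Int) (r g b a : Int)
    (hr : 1 ≤ r ∧ r ≤ 10) (hg : 1 ≤ g ∧ g ≤ 10)
    (hb : 1 ≤ b ∧ b ≤ 10) (ha : 1 ≤ a ∧ a ≤ 10) :
    compute_pointwise_distance lure r g b a = pvBase lure + pvG r g b a (pvKey lure) := by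
  simp only [compute_pointwise_distance, pvBase, pvG, pvKey]
  rw [pvClamp_abs (PySem.List.pyGetD lure 0 0) r hr.1 hr.2,
      pvClamp_abs (PySem.List.pyGetD lure 1 0) g hg.1 hg.2,
      pvClamp_abs (PySem.List.pyGetD lure 2 0) b hb.1 hb.2,
      pvClamp_abs (PySem.List.pyGetD lure 3 0) a ha.1 ha.2]
  ring

theorem pv_nodup_keys (ls : List (List Int)) :
    ∀ d : PySem.Dict (Int × Int × Int × Int) Int, d.keys.Nodup →
      (ls.foldl pvUpd d).keys.Nodup := by
  induction ls with
  | nil => intro d hd; simpa using hd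
  | cons l tl ih =>
      intro d hd
      simp only [List.foldl_cons]
      apply ih
      unfold pvUpd
      split
      · exact PySem.Dict.nodup_keys_insert d _ _ hd
      · exact hd

theorem pvFB_upd (r g b a : Int) (d : PySem.Dict (Int × Int × Int × Int) Int)
    (hd : d.keys.Nodup) (lure : List Int) :
    pvFB r g b a 400 (pvUpd d lure).items =
      min (pvFB r g b a 400 d.items) (pvBase lure + pvG r g b a (pvKey lure)) := by
  unfold pvUpd
  rcases hc : d.contains (pvKey lure) with _ | _
  · -- key absent: insert appends
    simp only [Bool.not_false, Bool.true_or, if_true]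
    rw [PySem.Dict.items_insert_of_not_contains d _ hc, pvFB_append]
  · -- key present with some value v
    have hsome : (d.get? (pvKey lure)).isSome := by
      rw [← PySem.Dict.contains_eq_isSome_get?, hc]
    rcases hv : d.get? (pvKey lure) with _ | v
    · rw [hv] at hsome; simp at hsome
    have hgd : d.getD (pvKey lure) 0 = v := by
      rw [PySem.Dict.getD_eq_get?_getD, hv]; rfl
    have hmem : (pvKey lure, v) ∈ d.items := PySem.Dict.mem_items_of_get?_eq_some d hv
    have hkeys : (d.items.map (·.1)).Nodup := hd
    simp only [Bool.not_true, Bool.false_or, hgd]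
    by_cases hlt : pvBase lure < v
    · rw [if_pos (by simpa using hlt), PySem.Dict.items_insert_of_contains d _ hc]
      exact pvFB_replace r g b a d.items (pvKey lure) v (pvBase lure) hkeys hmem hlt.le 400
    · rw [if_neg (by simpa using hlt)]
      have hle : pvFB r g b a 400 d.items ≤ v + pvG r g b a (pvKey lure) :=
        pvFB_le_mem r g b a d.items _ v hmem 400
      exact (min_eq_left (le_trans hle (add_le_add (le_of_not_gt hlt) le_rfl))).symm

-- the inner scan over dict items equals A's inner scan over the lures
theorem pv_inner_eq (ls : List (List Int))
    (r g b a : Int) (hr : 1 ≤ r ∧ r ≤ 10) (hg : 1 ≤ g ∧ g ≤ 10)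
    (hb : 1 ≤ b ∧ b ≤ 10) (ha : 1 ≤ a ∧ a ≤ 10) :
    pvFB r g b a 400 ((ls.foldl pvUpd PySem.Dict.empty).items) =
      ls.foldl (fun best lure => min best (compute_pointwise_distance lure r g b a)) 400 := by
  induction ls using List.reverseRecOn with
  | nil => simp [pvFB, PySem.Dict.empty]
  | append_singleton tl l ih =>
      rw [List.foldl_append, List.foldl_append, List.foldl_cons, List.foldl_nil,
        List.foldl_cons, List.foldl_nil,
        pvFB_upd r g b a _ (pv_nodup_keys tl PySem.Dict.empty PySem.Dict.nodup_keys_empty) l,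
        ih, pv_dist_eq l r g b a hr hg hb ha]

-- B's literal inner step is the min fold pvFB
theorem pv_step_eq (r g b a : Int) (its : List ((Int × Int × Int × Int) × Int)) :
    its.foldl (fun best cb =>
        let dd := cb.2 + |cb.1.1 - r| + |cb.1.2.1 - g| + |cb.1.2.2.1 - b| + |cb.1.2.2.2 - a|
        if dd < best then dd else best) 400 = pvFB r g b a 400 its := by
  unfold pvFB
  apply PySem.List.foldl_congr_mem
  intro acc x _
  dsimp only
  have harr : x.2 + |x.1.1 - r| + |x.1.2.1 - g| + |x.1.2.2.1 - b| + |x.1.2.2.2 - a|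
      = x.2 + pvG r g b a x.1 := by simp only [pvG]; ring
  rw [harr]
  by_cases h : x.2 + pvG r g b a x.1 < acc
  · rw [if_pos h, min_eq_right h.le]
  · rw [if_neg h, min_eq_left (le_of_not_gt h)]

-- ===== VERDICT (by name: the statement is the Claim_ definition above) =====
theorem try_out_lure_set_spec : Claim_equal_try_out_lure_set := by
  intro lure_set inc _hdom hpre
  unfold Spec_try_out_lure_set
  rcases hpre with ⟨hne, _hlen⟩
  rcases lt_trichotomy inc 0 with hneg | hz | hpos
  · -- negative step: empty grid on both sides
    have hnil : PySem.List.pyRange 1 11 inc = [] := by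
      simp [PySem.List.pyRange]; omega
    unfold try_out_lure_set try_out_lure_set_alt
    simp [hnil]
  · exact absurd hz hne
  · -- positive step
    have hmem : ∀ x ∈ PySem.List.pyRange 1 11 inc, 1 ≤ x ∧ x ≤ 10 := by
      intro x hx
      have := (PySem.List.mem_pyRange_iff_of_pos hpos x).mp hx
      omega
    have hnil : PySem.List.pyRange 1 11 inc ≠ [] := by
      intro h
      have h1 : (1 : Int) ∈ PySem.List.pyRange 1 11 inc :=
        (PySem.List.mem_pyRange_iff_of_pos hpos 1).mpr (by simp)
      rw [h] at h1; cases h1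
    unfold try_out_lure_set try_out_lure_set_alt
    rw [if_neg hnil]
    apply PySem.List.foldl_congr_mem
    intro t1 r hrm
    apply PySem.List.foldl_congr_mem
    intro t2 g hgm
    apply PySem.List.foldl_congr_mem
    intro t3 b hbm
    apply PySem.List.foldl_congr_mem
    intro t4 a ham
    apply congrArg
    rw [pv_step_eq, pv_inner_eq lure_set r g b a
      (hmem r hrm) (hmem g hgm) (hmem b hbm) (hmem a ham)]
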